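-- pv_equiv track=rewrite | github.com/dianachu0209/CMSC141 | 141 HWs/hw6.py | get_entity_counts
-- ===== SOURCE A (Python) =====
-- def get_entity_counts(tweets, entity_key):
--     """
--     Constructs a dictionary mapping values associated with an entity key
--     to the number of times it occurs.
--
--     Inputs:
--         tweets [list[dict(str, str)]]: list of processed tweets with
--             all input entities and their values
--         entity_key [str]: key of interest
--
--     Returns [list[tuple(str, int)]]: list of tuples with entity key values and
--         the number of times they occurred
--     """
--
--     key_to_val = {}
--     ready_to_sort = []
--     for tweet in tweets:
--         keys = tweet[entity_key]
--         for key in keys: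
--             key = key.lower()
--             if key not in key_to_val:
--                 key_to_val[key] = 1
--             elif key in key_to_val:
--                 key_to_val[key] += 1
--     for value in key_to_val.items():
--         ready_to_sort.append(value)
--     return ready_to_sort
-- ===== SOURCE B (Python) =====
-- def get_entity_counts(tweets, entity_key):
--     vals = [v.lower() for tweet in tweets for v in tweet[entity_key]]
--     out = []
--     while vals:
--         v = vals[0]
--         out.append((v, vals.count(v)))
--         vals = [x for x in vals if x != v]
--     return out
-- ===== Notes on version B (the rewrite author's own statement) =====
-- stated objective: alternative
-- what changed: B drops the counting dict entirely: it flattens the lowercased values into one list and runs a partition loop that repeatedly emits (first remaining value, its count) and then filters out all occurrences of that value, instead of A's single-pass hash accumulation.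
import Mathlib
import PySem

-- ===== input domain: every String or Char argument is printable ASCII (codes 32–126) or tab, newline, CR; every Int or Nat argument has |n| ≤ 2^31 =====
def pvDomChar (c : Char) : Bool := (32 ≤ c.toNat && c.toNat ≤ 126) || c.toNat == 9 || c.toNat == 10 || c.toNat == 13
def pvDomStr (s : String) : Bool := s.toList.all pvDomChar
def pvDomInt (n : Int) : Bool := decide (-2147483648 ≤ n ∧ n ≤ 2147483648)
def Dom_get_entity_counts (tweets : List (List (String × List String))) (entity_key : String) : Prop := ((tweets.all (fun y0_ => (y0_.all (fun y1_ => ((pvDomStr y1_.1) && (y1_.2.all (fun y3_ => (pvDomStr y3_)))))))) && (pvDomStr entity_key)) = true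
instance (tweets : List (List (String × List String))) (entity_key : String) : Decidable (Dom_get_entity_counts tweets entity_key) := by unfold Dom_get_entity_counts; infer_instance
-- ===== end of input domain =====

-- B replaces A's dict accumulation by a dict-free partition loop: repeatedly take the first
-- remaining lowercased value, record (value, its count), and delete all its occurrences. Objective: alternative.

-- ===== PORT A =====
-- tweet[entity_key] is total under Pre_ (the key is present in every tweet); getD [] is exact there.
def get_entity_counts (tweets : List (List (String × List String))) (entity_key : String) : List (String × Int) :=
  let key_to_val : PySem.Dict String Int :=
    tweets.foldl (fun d tweet =>
      let keys := (PySem.Dict.mk tweet).getD entity_key []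
      keys.foldl (fun d key =>
        let key := PySem.Str.lower key
        if ¬ d.contains key then d.insert key 1
        else if d.contains key then d.insert key (d.getD key 0 + 1)
        else d) d) PySem.Dict.empty
  key_to_val.items.foldl (fun acc value => acc ++ [value]) []

-- ===== PORT B =====
-- the while loop of Source B: emit (head, its count in the remaining list), then drop all its occurrences
def pvBucketize : List String → List (String × Int)
  | [] => []
  | v :: rest =>
      (v, (PySem.List.count (v :: rest) v : Int)) :: pvBucketize ((v :: rest).filter (fun x => x != v))
termination_by l => l.length
decreasing_by
  simp only [List.filter_cons, bne_self_eq_false, Bool.false_eq_true, if_false]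
  exact Nat.lt_succ_of_le (List.length_filter_le _ _)

def get_entity_counts_alt (tweets : List (List (String × List String))) (entity_key : String) : List (String × Int) :=
  let vals := tweets.flatMap (fun tweet =>
    ((PySem.Dict.mk tweet).getD entity_key []).map PySem.Str.lower)
  pvBucketize vals

-- ===== PRECONDITION & SPEC =====
-- Pre_ excludes exactly the inputs where some tweet lacks entity_key: there both A and B raise KeyError.
def Pre_get_entity_counts (tweets : List (List (String × List String))) (entity_key : String) : Prop :=
  ∀ tweet ∈ tweets, ∃ p ∈ tweet, p.1 = entity_key
instance (tweets : List (List (String × List String))) (entity_key : String) : Decidable (Pre_get_entity_counts tweets entity_key) := by unfold Pre_get_entity_counts; infer_instance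
def pvWitness_get_entity_counts : (List (List (String × List String))) × String :=
  ([[("k", ["A", "b", "a"])], [("k", ["B"]), ("x", ["z"])]], "k")

def Spec_get_entity_counts (tweets : List (List (String × List String))) (entity_key : String) (out : List (String × Int)) : Prop := out = get_entity_counts_alt tweets entity_key
instance (tweets : List (List (String × List String))) (entity_key : String) (out : List (String × Int)) : Decidable (Spec_get_entity_counts tweets entity_key out) := by unfold Spec_get_entity_counts; infer_instance

-- ===== CLAIM (what is proved, stated in full; the proofs are below) =====
def Claim_equal_get_entity_counts : Prop := ∀ (tweets : List (List (String × List String))) (entity_key : String), Dom_get_entity_counts tweets entity_key → Pre_get_entity_counts tweets entity_key → Spec_get_entity_counts tweets entity_key (get_entity_counts tweets entity_key)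

-- ===== LEMMAS AND PROOFS =====

-- A's per-key step is the standard counting step (insert key (old + 1)), in both branches.
theorem step_eq (d : PySem.Dict String Int) (k : String) :
    (if ¬ d.contains k then d.insert k 1
     else if d.contains k then d.insert k (d.getD k 0 + 1) else d)
      = d.insert k (d.getD k 0 + 1) := by
  by_cases h : d.contains k
  · simp [h]
  · have h0 : d.getD k 0 = 0 := PySem.Dict.getD_of_not_contains d 0 (by simpa using h)
    simp [h, h0]

-- first-occurrence dedup commutes with removing one value
theorem ofList_filter_ne (v : String) (rest : List String) :
    (PySem.Set.ofList rest).filter (fun x => x != v)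
      = PySem.Set.ofList (rest.filter (fun x => x != v)) := by
  induction rest with
  | nil => rfl
  | cons a t ih =>
    rw [PySem.Set.ofList_cons, List.filter_cons, List.filter_cons]
    by_cases h : a = v
    · subst h
      simp only [bne_self_eq_false, Bool.false_eq_true, if_false]
      rw [← ih]
      simp only [PySem.Set.discard, List.filter_filter]
      congr 1
      funext y
      by_cases hy : y = a <;> simp [hy]
    · have hb : (a != v) = true := by simpa using h
      rw [hb]
      simp only [if_true]
      rw [PySem.Set.ofList_cons, ← ih]
      simp only [PySem.Set.discard, List.filter_filter]
      have hc : (fun y : String => y != v && !y == a) = (fun y => !y == a && y != v) := by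
        funext y; rw [Bool.and_comm]
      rw [hc]

-- B's partition loop computes exactly the first-occurrence (value, count) table
theorem bucket_eq (vals : List String) :
    pvBucketize vals = (PySem.Set.ofList vals).map (fun k => (k, (vals.count k : Int))) := by
  induction hn : vals.length using Nat.strong_induction_on generalizing vals with
  | _ n ih =>
    match vals with
    | [] => simp [pvBucketize, PySem.Set.ofList]
    | v :: rest =>
      rw [pvBucketize]
      simp only [List.filter_cons, bne_self_eq_false, Bool.false_eq_true, if_false]
      have hlen : (rest.filter (fun x => x != v)).length < n := by
        subst hn
        exact Nat.lt_succ_of_le (List.length_filter_le _ _)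
      rw [ih _ hlen _ rfl]
      rw [PySem.Set.ofList_cons]
      have hd : (PySem.Set.ofList rest).discard v
          = PySem.Set.ofList (rest.filter (fun x => x != v)) := by
        rw [← ofList_filter_ne]
        simp only [PySem.Set.discard]
        congr 1
      rw [List.map_cons, ← hd]
      have hhead : ((v, (PySem.List.count (v :: rest) v : Int)) : String × Int)
          = (v, (List.count v (v :: rest) : Int)) := by
        simp [PySem.List.count_eq]
      rw [hhead]
      congr 1
      rw [hd]
      apply List.map_congr_left
      intro k hk
      have hkne : k ≠ v := by
        have := (PySem.Set.mem_ofList _ k).mp hk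
        simp only [List.mem_filter] at this
        simpa using this.2
      have hc : List.count k (rest.filter (fun x => x != v)) = List.count k (v :: rest) := by
        rw [List.count_cons]
        have hvk : (v == k) = false := by simpa using (Ne.symm hkne)
        rw [hvk]
        simp only [Bool.false_eq_true, if_false, Nat.add_zero]
        rw [List.count_filter (by simpa using hkne)]
      rw [hc]

-- ===== VERDICT (by name: the statement is the Claim_ definition above) =====
theorem get_entity_counts_spec : Claim_equal_get_entity_counts := by
  intro tweets entity_key _ _
  unfold Spec_get_entity_counts get_entity_counts get_entity_counts_alt
  simp only [step_eq]
  rw [show (fun (d : PySem.Dict String Int) (tweet : List (String × List String)) =>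
        ((PySem.Dict.mk tweet).getD entity_key []).foldl
          (fun d key => d.insert (PySem.Str.lower key) (d.getD (PySem.Str.lower key) 0 + 1)) d)
      = (fun d tweet =>
        (((PySem.Dict.mk tweet).getD entity_key []).map PySem.Str.lower).foldl
          (fun d key => d.insert key (d.getD key 0 + 1)) d) from by
        funext d tweet; rw [List.foldl_map]]
  rw [← List.foldl_flatMap, PySem.Dict.foldl_insert_getD_add_one_eq_counter,
      PySem.Dict.items_counter, bucket_eq]
  simp only [PySem.List.foldl_append_singleton_eq_map (f := fun v : String × Int => v)]
  simp [List.count_eq_countP]
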